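-- pv_equiv track=rewrite | github.com/sagemath/sage-archive-2023-02-01 | src/sage/modular/multiple_zeta.py | basis_f_odd_iterator
-- ===== SOURCE A (Python) =====
-- def basis_f_odd_iterator(n):
--     """
--     Return an iterator over compositions of ``n`` with parts in ``(3,5,7,...)``
--
--     INPUT:
--
--     - ``n`` -- an integer
--
--     EXAMPLES::
--
--         sage: from sage.modular.multiple_zeta import basis_f_odd_iterator
--         sage: [list(basis_f_odd_iterator(i)) for i in range(2,9)]
--         [[], [(3,)], [], [(5,)], [(3, 3)], [(7,)], [(5, 3), (3, 5)]]
--         sage: list(basis_f_odd_iterator(14))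
--         [(11, 3),
--          (5, 3, 3, 3),
--          (3, 5, 3, 3),
--          (3, 3, 5, 3),
--          (9, 5),
--          (3, 3, 3, 5),
--          (7, 7),
--          (5, 9),
--          (3, 11)]
--     """
--     if n == 0:
--         yield tuple([])
--         return
--     if n == 1:
--         return
--     if n % 2:
--         yield (n,)
--     for k in range(3, n, 2):
--         for start in basis_f_odd_iterator(n - k):
--             yield start + (k, )
-- ===== SOURCE B (Python) =====
-- def basis_f_odd_iterator(n):
--     # Bottom-up DP: compositions of every m <= n into odd parts >= 3 are built
--     # once in a table and reused, instead of re-enumerating each subproblem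
--     # recursively.  A negative number has no such composition.
--     if n < 0:
--         return
--     table = [[()]]
--     for m in range(1, n + 1):
--         comps = [(m,)] if m % 2 and m >= 3 else []
--         for k in range(3, m, 2):
--             comps += [c + (k,) for c in table[m - k]]
--         table.append(comps)
--     yield from table[n]
-- ===== Notes on version B (the rewrite author's own statement) =====
-- stated objective: alternative
-- what changed: Replaces A's recursive generator (which re-enumerates each subproblem's compositions on every recursive call) by a bottom-up dynamic-programming table holding the composition list for every value 0..n, built once and indexed for the inner extensions.
-- intended difference: For negative odd n, A yields a singleton tuple containing n itself (its parity branch fires before the empty range), which is not a valid composition into odd parts of size at least three; B yields nothing there, the intended value since a negative integer has no such composition. — e.g. on basis_f_odd_iterator(-3): A returns [[-3]], B returns []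
import Mathlib
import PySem

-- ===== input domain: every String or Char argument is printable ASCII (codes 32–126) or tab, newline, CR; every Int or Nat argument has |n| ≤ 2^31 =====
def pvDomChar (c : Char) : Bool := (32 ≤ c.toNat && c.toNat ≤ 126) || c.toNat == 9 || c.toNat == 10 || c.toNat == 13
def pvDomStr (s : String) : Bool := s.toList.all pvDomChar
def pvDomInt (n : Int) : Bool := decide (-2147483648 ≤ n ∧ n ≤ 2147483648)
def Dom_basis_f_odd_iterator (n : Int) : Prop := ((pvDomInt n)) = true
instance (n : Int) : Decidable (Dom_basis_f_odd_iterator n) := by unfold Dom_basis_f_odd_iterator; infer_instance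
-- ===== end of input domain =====

-- B replaces A's recursive re-enumeration of subproblems by a bottom-up table of
-- compositions built once per value (objective: alternative; same output order);
-- on negative odd n the two differ as stated in D_ below.

-- ===== PORT A =====
-- Literal port of the recursive generator: yields collected in order into a list.
-- `fuel` is only a structural-termination guard (any fuel > n.toNat gives the
-- same value, proved in pvAgo_fuel below); the recursion itself is A's.
def pvAgo : Nat → Int → List (List Int)
  | 0, _ => []
  | fuel + 1, n =>
    if n = 0 then [[]]
    else if n = 1 then []
    else
      (if PySem.Int.mod n 2 ≠ 0 then [[n]] else []) ++
      (PySem.List.pyRange 3 n 2).foldl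
        (fun acc k => acc ++ (pvAgo fuel (n - k)).map (fun s => s ++ [k])) []

def basis_f_odd_iterator (n : Int) : List (List Int) := pvAgo (n.toNat + 1) n

-- ===== PORT B =====
-- one iteration of Source B's `for m in range(1, n + 1)` loop body (appends table[m])
def pvStep (tab : Array (List (List Int))) (m : Nat) : Array (List (List Int)) :=
  tab.push (
    (if m % 2 = 1 ∧ 3 ≤ m then [[(m : Int)]] else []) ++
    (PySem.List.pyRange 3 (m : Int) 2).foldl
      (fun acc k => acc ++ (tab.getD (m - k.toNat) []).map (fun c => c ++ [k])) [])

def basis_f_odd_iterator_alt (n : Int) : List (List Int) :=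
  if n < 0 then []
  else
    let table := (List.range' 1 n.toNat).foldl pvStep #[[[]]]
    table.getD n.toNat []

-- ===== PRECONDITION & SPEC =====
-- For negative odd n, A yields a singleton tuple containing n itself (its parity
-- branch fires before the empty range), which is not a valid composition into odd
-- parts of size at least three; B yields nothing there, the intended value since a
-- negative integer has no such composition.
def D_basis_f_odd_iterator (n : Int) : Prop := n < 0 ∧ n % 2 ≠ 0
instance (n : Int) : Decidable (D_basis_f_odd_iterator n) := by unfold D_basis_f_odd_iterator; infer_instance
def Spec_basis_f_odd_iterator (n : Int) (out : List (List Int)) : Prop := ¬ D_basis_f_odd_iterator n → out = basis_f_odd_iterator_alt n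
instance (n : Int) (out : List (List Int)) : Decidable (Spec_basis_f_odd_iterator n out) := by unfold Spec_basis_f_odd_iterator; infer_instance
def pvDiffWitness_basis_f_odd_iterator : Int := (-3)
def pvDiffWitnessOut_basis_f_odd_iterator : (List (List Int)) × (List (List Int)) := ([[-3]], [])

-- ===== CLAIM (what is proved, stated in full; the proofs are below) =====
def Claim_unchanged_basis_f_odd_iterator : Prop := ∀ (n : Int), Dom_basis_f_odd_iterator n → Spec_basis_f_odd_iterator n (basis_f_odd_iterator n)
def Claim_changed_basis_f_odd_iterator : Prop := Dom_basis_f_odd_iterator (pvDiffWitness_basis_f_odd_iterator) ∧ D_basis_f_odd_iterator (pvDiffWitness_basis_f_odd_iterator) ∧ basis_f_odd_iterator (pvDiffWitness_basis_f_odd_iterator) = pvDiffWitnessOut_basis_f_odd_iterator.1 ∧ basis_f_odd_iterator_alt (pvDiffWitness_basis_f_odd_iterator) = pvDiffWitnessOut_basis_f_odd_iterator.2 ∧ pvDiffWitnessOut_basis_f_odd_iterator.1 ≠ pvDiffWitnessOut_basis_f_odd_iterator.2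
def Claim_exact_basis_f_odd_iterator : Prop := ∀ (n : Int), Dom_basis_f_odd_iterator n → D_basis_f_odd_iterator n → basis_f_odd_iterator n ≠ basis_f_odd_iterator_alt n

-- ===== LEMMAS AND PROOFS =====

-- fuel does not matter as long as it exceeds n.toNat
lemma pvAgo_fuel (f1 : Nat) : ∀ (f2 : Nat) (n : Int), n.toNat < f1 → n.toNat < f2 →
    pvAgo f1 n = pvAgo f2 n := by
  induction f1 with
  | zero => intro f2 n h1; omega
  | succ f1 ih =>
    intro f2 n h1 h2
    obtain ⟨f2, rfl⟩ : ∃ m, f2 = m + 1 := ⟨f2 - 1, by omega⟩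
    show pvAgo (f1 + 1) n = pvAgo (f2 + 1) n
    unfold pvAgo
    by_cases h0 : n = 0
    · simp [h0]
    · by_cases h1' : n = 1
      · simp [h1']
      · simp only [h0, h1', if_false]
        congr 1
        refine PySem.List.foldl_congr_mem _ _ _ _ ?_
        intro acc k hk
        have hb := (PySem.List.mem_pyRange_iff_of_pos (by norm_num) k).mp hk
        rw [ih f2 (n - k) (by omega) (by omega)]

-- A's unfolding with the fuel guard removed
lemma A_unfold (n : Int) (h0 : n ≠ 0) (h1 : n ≠ 1) :
    basis_f_odd_iterator n =
      (if PySem.Int.mod n 2 ≠ 0 then [[n]] else []) ++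
      (PySem.List.pyRange 3 n 2).foldl
        (fun acc k => acc ++ (basis_f_odd_iterator (n - k)).map (fun s => s ++ [k])) [] := by
  show pvAgo (n.toNat + 1) n = _
  unfold pvAgo
  simp only [h0, h1, if_false]
  congr 1
  refine PySem.List.foldl_congr_mem _ _ _ _ ?_
  intro acc k hk
  have hb := (PySem.List.mem_pyRange_iff_of_pos (by norm_num) k).mp hk
  rw [pvAgo_fuel n.toNat ((n - k).toNat + 1) (n - k) (by omega) (by omega)]
  rfl

lemma A_zero : basis_f_odd_iterator 0 = [[]] := rfl

lemma A_one : basis_f_odd_iterator 1 = [] := rfl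

-- invariant of Source B's table-building loop: after iterations 1..N the table holds
-- basis_f_odd_iterator i at every index i ≤ N
lemma table_spec (N : Nat) :
    ((List.range' 1 N).foldl pvStep #[[[]]]).size = N + 1 ∧
    ∀ i, i ≤ N → ((List.range' 1 N).foldl pvStep #[[[]]]).getD i [] = basis_f_odd_iterator (i : Int) := by
  induction N with
  | zero =>
    refine ⟨rfl, ?_⟩
    intro i hi
    interval_cases i
    exact A_zero.symm ▸ rfl
  | succ N ih =>
    obtain ⟨hsz, hval⟩ := ih
    rw [List.range'_1_concat, List.foldl_append, List.foldl_cons, List.foldl_nil]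
    set tab := (List.range' 1 N).foldl pvStep #[[[]]] with htab
    have hpush : ∀ (x : List (List Int)) (i : Nat), i ≤ N + 1 →
        (tab.push x).getD i [] = if i ≤ N then tab.getD i [] else x := by
      intro x i hi
      by_cases h : i ≤ N
      · rw [if_pos h, Array.getD_eq_getD_getElem?, Array.getD_eq_getD_getElem?,
          Array.getElem?_push, if_neg (by rw [hsz]; omega : ¬ i = tab.size)]
      · rw [if_neg h, Array.getD_eq_getD_getElem?, Array.getElem?_push,
          if_pos (by rw [hsz]; omega : i = tab.size)]
        rfl
    have hentry : pvStep tab (1 + N) = tab.push (basis_f_odd_iterator ((N + 1 : Nat) : Int)) := by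
      unfold pvStep
      congr 1
      have hm : 1 + N = N + 1 := by omega
      rw [hm]
      by_cases h1 : N + 1 = 1
      · have : N = 0 := by omega
        subst this
        simp [A_one]
        decide
      · have hN0 : ((N + 1 : Nat) : Int) ≠ 0 := by exact_mod_cast (by omega : N + 1 ≠ 0)
        have hN1 : ((N + 1 : Nat) : Int) ≠ 1 := by exact_mod_cast h1
        rw [A_unfold _ hN0 hN1]
        congr 1
        · -- the head: B's `m % 2 and m >= 3` agrees with A's `n % 2` for m ≥ 2
          have hm2 : PySem.Int.mod ((N + 1 : Nat) : Int) 2 = (((N + 1) % 2 : Nat) : Int) :=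
            PySem.Int.mod_natCast (N + 1) 2
          rcases Nat.mod_two_eq_zero_or_one (N + 1) with h | h
          · rw [hm2, h]; simp [h]
          · rw [hm2, h]
            have h3 : 3 ≤ N + 1 := by omega
            simp [h, h3]
        · -- the inner loop: table lookups agree with recursive calls
          refine (PySem.List.foldl_congr_mem _ _ _ _ ?_).symm
          intro acc k hk
          have hb := (PySem.List.mem_pyRange_iff_of_pos (by norm_num) k).mp hk
          have hklt : N + 1 - k.toNat ≤ N := by omega
          have hcast : ((N + 1 - k.toNat : Nat) : Int) = ((N + 1 : Nat) : Int) - k := by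
            push_cast; omega
          rw [hval _ hklt, hcast]
    rw [hentry]
    refine ⟨by simp [hsz], ?_⟩
    intro i hi
    rw [hpush _ i hi]
    by_cases h : i ≤ N
    · simp [h, hval i h]
    · have : i = N + 1 := by omega
      simp [this]

-- ===== VERDICT (by name: the statements are the Claim_ definitions above) =====
theorem basis_f_odd_iterator_spec : Claim_unchanged_basis_f_odd_iterator := by
  intro n _ hD
  unfold basis_f_odd_iterator_alt
  by_cases hneg : n < 0
  · -- negative even n: A's range(3, n, 2) is empty and the parity head is empty too
    have h2 : n % 2 = 0 := by
      by_contra h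
      exact hD ⟨hneg, h⟩
    have h0 : n ≠ 0 := by omega
    have h1 : n ≠ 1 := by omega
    rw [A_unfold n h0 h1]
    have hr : PySem.List.pyRange 3 n 2 = [] := by
      rw [PySem.List.pyRange_of_pos 3 n (by norm_num)]
      have : ¬ (3 < n) := by omega
      simp [this]
    have hmod : PySem.Int.mod n 2 = 0 := by
      rw [PySem.Int.mod_eq_emod_of_pos (by norm_num)]; exact h2
    rw [hr]
    simp only [List.foldl_nil, List.append_nil]
    rw [if_neg (not_not_intro hmod)]
    simp [hneg]
  · obtain ⟨hsz, hval⟩ := table_spec n.toNat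
    have hn : ((n.toNat : Int)) = n := by omega
    rw [if_neg hneg]
    have := hval n.toNat (by omega)
    rw [this, hn]

theorem basis_f_odd_iterator_changed : Claim_changed_basis_f_odd_iterator := by
  unfold Claim_changed_basis_f_odd_iterator; decide

theorem basis_f_odd_iterator_tight : Claim_exact_basis_f_odd_iterator := by
  intro n _ ⟨hneg, hodd⟩
  have h0 : n ≠ 0 := by omega
  have h1 : n ≠ 1 := by omega
  rw [A_unfold n h0 h1]
  have hr : PySem.List.pyRange 3 n 2 = [] := by
    rw [PySem.List.pyRange_of_pos 3 n (by norm_num)]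
    have : ¬ (3 < n) := by omega
    simp [this]
  have hmod : PySem.Int.mod n 2 ≠ 0 := by
    rw [PySem.Int.mod_eq_emod_of_pos (by norm_num)]; exact hodd
  rw [hr]
  simp only [List.foldl_nil, List.append_nil, if_pos hmod]
  simp [basis_f_odd_iterator_alt, hneg]
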